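-- pv_equiv track=rewrite | github.com/RelationalAI/logical-query-protocol | python-tools/src/meta/yacc_grammar.py | tokenize_rhs
-- ===== SOURCE A (Python) =====
-- from typing import Dict, List, Optional, Tuple, Set
--
-- class YaccGrammarError(Exception):
--     """Error during yacc grammar parsing."""
--     def __init__(self, message: str, line: Optional[int] = None):
--         if line is not None:
--             message = f"line {line}: {message}"
--         super().__init__(message)
--         self.line = line
--
-- def tokenize_rhs(text: str) -> List[str]:
--     """Tokenize an RHS string into elements."""
--     tokens = []
--     i = 0
--     while i < len(text):
--         # Skip whitespace
--         while i < len(text) and text[i].isspace():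
--             i += 1
--         if i >= len(text):
--             break
--
--         # Handle string literal
--         if text[i] == '"':
--             j = i + 1
--             while j < len(text) and text[j] != '"':
--                 if text[j] == '\\':
--                     j += 2
--                 else:
--                     j += 1
--             if j >= len(text):
--                 raise YaccGrammarError(f"Unterminated string literal in RHS: {text}")
--             tokens.append(text[i:j+1])
--             i = j + 1
--         # Handle identifier (possibly with * or ?)
--         elif text[i].isalnum() or text[i] == '_':
--             j = i
--             while j < len(text) and (text[j].isalnum() or text[j] == '_'):
--                 j += 1
--             # Include trailing * or ?
--             if j < len(text) and text[j] in '*?':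
--                 j += 1
--             tokens.append(text[i:j])
--             i = j
--         else:
--             raise YaccGrammarError(f"Unexpected character in RHS: {text[i]!r} in {text}")
--
--     return tokens
-- ===== SOURCE B (Python) =====
-- import re
-- from typing import List, Optional
--
-- class YaccGrammarError(Exception):
--     """Error during yacc grammar parsing."""
--     def __init__(self, message: str, line: Optional[int] = None):
--         if line is not None:
--             message = f"line {line}: {message}"
--         super().__init__(message)
--         self.line = line
--
-- # One compiled pattern: whitespace run | string literal | identifier (with optional * or ?)
-- _TOKEN_RE = re.compile(r'(\s+)|"(?:\\.|[^"\\])*"|[A-Za-z0-9_]+[*?]?', re.DOTALL)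
--
-- def tokenize_rhs(text: str) -> List[str]:
--     """Tokenize an RHS string into elements (regex-driven scanner)."""
--     tokens = []
--     i = 0
--     n = len(text)
--     while i < n:
--         m = _TOKEN_RE.match(text, i)
--         if m is None:
--             if text[i] == '"':
--                 raise YaccGrammarError(f"Unterminated string literal in RHS: {text}")
--             raise YaccGrammarError(f"Unexpected character in RHS: {text[i]!r} in {text}")
--         if m.lastindex != 1:  # not a whitespace run
--             tokens.append(m.group(0))
--         i = m.end()
--     return tokens
-- ===== Notes on version B (the rewrite author's own statement) =====
-- stated objective: idiomatic
-- what changed: Replaced the hand-written index-walking scanner (outer while with nested whitespace/literal/identifier index loops) by a single compiled regex pattern (whitespace run | string literal | identifier with optional * or ?) matched repeatedly with re.match; tokens are the match slices.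
import Mathlib
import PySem

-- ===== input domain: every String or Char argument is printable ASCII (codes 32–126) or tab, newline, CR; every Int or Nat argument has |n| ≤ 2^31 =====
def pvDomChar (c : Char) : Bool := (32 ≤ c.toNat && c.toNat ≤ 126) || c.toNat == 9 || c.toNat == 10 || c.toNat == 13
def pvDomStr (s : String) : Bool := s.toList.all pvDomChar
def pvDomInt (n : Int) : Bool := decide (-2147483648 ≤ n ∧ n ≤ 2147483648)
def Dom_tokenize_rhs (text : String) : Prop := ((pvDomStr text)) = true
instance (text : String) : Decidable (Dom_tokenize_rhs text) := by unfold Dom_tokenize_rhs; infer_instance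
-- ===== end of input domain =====

-- B replaces A's hand-written index-walking scanner by a regex-driven scanner (one compiled
-- pattern: whitespace | string literal | identifier[*?]) matched repeatedly; objective: idiomatic.
-- Where Python A raises YaccGrammarError both ports return [] (those inputs are excluded by Pre_).

-- ===== PORT A =====
-- A classifies characters with str.isspace / str.isalnum
def isWordA (c : Char) : Bool := PySem.Chars.isalnum c || c = '_'

-- the inner literal scan: `j = i+1; while text[j] != '"': backslash skips 2 else 1`;
-- returns the characters strictly between the quotes and the rest after the closing quote,
-- none = "Unterminated string literal" (j ran past the end)
def scanLitA : List Char → List Char → Option (List Char × List Char)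
  | [], _ => none
  | c :: rest, acc =>
    if c = '"' then some (acc.reverse, rest)
    else if c = '\\' then
      match rest with
      | [] => none
      | d :: rest' => scanLitA rest' (d :: c :: acc)
    else scanLitA rest (c :: acc)

-- the inner identifier scan: `while text[j].isalnum() or text[j] == '_': j += 1`
def scanWordA : List Char → List Char × List Char
  | [] => ([], [])
  | c :: rest =>
    if isWordA c then
      let p := scanWordA rest
      (c :: p.1, p.2)
    else ([], c :: rest)

-- termination facts for tokA (cited in decreasing_by)
theorem scanLitA_rest_lt_aux : ∀ (m : Nat) (cs : List Char), cs.length ≤ m →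
    ∀ (acc content rest : List Char),
    scanLitA cs acc = some (content, rest) → rest.length < cs.length := by
  intro m
  induction m with
  | zero =>
    intro cs hm acc content rest h
    match cs with
    | [] => simp [scanLitA] at h
    | c :: _ => simp at hm
  | succ m ih =>
    intro cs hm acc content rest h
    match cs with
    | [] => simp [scanLitA] at h
    | c :: cs0 =>
      rw [scanLitA.eq_def] at h
      by_cases hq : c = '"'
      · simp [hq] at h
        obtain ⟨-, rfl⟩ := h
        simp
      · by_cases hb : c = '\\'
        · simp [hq, hb] at h
          match cs0, h with
          | d :: cs1, h =>
            have := ih cs1 (by simp at hm ⊢; omega) _ _ _ h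
            simp at this ⊢
            omega
        · simp [hq, hb] at h
          have := ih cs0 (by simp at hm; omega) _ _ _ h
          simp at this ⊢
          omega

theorem scanLitA_rest_lt (cs acc content rest : List Char)
    (h : scanLitA cs acc = some (content, rest)) : rest.length < cs.length :=
  scanLitA_rest_lt_aux cs.length cs le_rfl acc content rest h

theorem scanWordA_snd_le : ∀ cs : List Char, (scanWordA cs).2.length ≤ cs.length := by
  intro cs
  induction cs with
  | nil => simp [scanWordA]
  | cons c rest ih =>
    by_cases h : isWordA c = true <;> simp [scanWordA, h] <;> omega

-- main loop of A: skip whitespace one character at a time, then dispatch on the first character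
def tokA : List Char → Option (List (List Char))
  | [] => some []
  | c :: cs =>
    if PySem.Chars.isspace c then tokA cs
    else if c = '"' then
      match hl : scanLitA cs [] with
      | none => none                     -- raise Unterminated string literal
      | some (content, rest) =>
        (tokA rest).map (fun ts => ('"' :: content ++ ['"']) :: ts)
    else if isWordA c then
      match hw : (scanWordA cs).2 with
      | s :: r' =>
        if s = '*' || s = '?' then
          (tokA r').map (fun ts => (c :: (scanWordA cs).1 ++ [s]) :: ts)
        else
          (tokA (s :: r')).map (fun ts => (c :: (scanWordA cs).1) :: ts)
      | [] => (tokA ([] : List Char)).map (fun ts => (c :: (scanWordA cs).1) :: ts)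
    else none                            -- raise Unexpected character
termination_by cs => cs.length
decreasing_by
  all_goals simp only [List.length_cons]
  all_goals first
    | omega
    | (have h1 := scanLitA_rest_lt cs [] content rest hl; omega)
    | (have h2 := scanWordA_snd_le cs; rw [hw] at h2; simp only [List.length_cons] at h2 ⊢; omega)
    | (have h2 := scanWordA_snd_le cs; rw [hw] at h2; omega)
def tokenize_rhs (text : String) : List String :=
  ((tokA text.toList).getD []).map (fun t => String.ofList t)

-- ===== PORT B =====
-- regex character classes, transcribed from the pattern `(\s+)|"(?:\\.|[^"\\])*"|[A-Za-z0-9_]+[*?]?`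
def spaceB (c : Char) : Bool :=   -- \s (ASCII part)
  c.toNat == 32 || c.toNat == 9 || c.toNat == 10 || c.toNat == 13 || c.toNat == 11 || c.toNat == 12
def identB (c : Char) : Bool :=   -- [A-Za-z0-9_]
  (65 ≤ c.toNat && c.toNat ≤ 90) || (97 ≤ c.toNat && c.toNat ≤ 122) ||
  (48 ≤ c.toNat && c.toNat ≤ 57) || c.toNat == 95

-- length matched by `\s+` (0 = no match)
def matchSpaceLenB : List Char → Nat
  | [] => 0
  | c :: cs => if spaceB c then matchSpaceLenB cs + 1 else 0

-- length matched by `(?:\\.|[^"\\])*"` (the literal's body plus closing quote)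
def litBodyB : List Char → Option Nat
  | [] => none
  | c :: cs =>
    if c = '"' then some 1
    else if c = '\\' then
      match cs with
      | [] => none
      | _ :: cs' => (litBodyB cs').map (· + 2)
    else (litBodyB cs).map (· + 1)

-- length matched by `"(?:\\.|[^"\\])*"` (none = alternative fails)
def matchLitLenB : List Char → Option Nat
  | [] => none
  | c :: cs => if c = '"' then (litBodyB cs).map (· + 1) else none

-- length matched by `[A-Za-z0-9_]+` (0 = no match)
def wordLenB : List Char → Nat
  | [] => 0
  | c :: cs => if identB c then wordLenB cs + 1 else 0

-- length matched by `[A-Za-z0-9_]+[*?]?` (0 = no match)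
def matchIdentLenB (l : List Char) : Nat :=
  let n := wordLenB l
  if n = 0 then 0
  else
    match l.drop n with
    | s :: _ => if s = '*' || s = '?' then n + 1 else n
    | [] => n

theorem matchLitLenB_pos (l : List Char) (n : Nat) (h : matchLitLenB l = some n) : 0 < n := by
  match l with
  | [] => simp [matchLitLenB] at h
  | c :: cs =>
    simp [matchLitLenB] at h
    obtain ⟨-, a, -, h2⟩ := h
    omega

-- B's main loop: at each position, try the compiled pattern's alternatives in order;
-- a whitespace match is skipped, a literal/identifier match is appended; no match = raise
def tokB : List Char → Option (List (List Char))
  | [] => some []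
  | c :: cs =>
    if hs : matchSpaceLenB (c :: cs) ≠ 0 then
      tokB ((c :: cs).drop (matchSpaceLenB (c :: cs)))
    else
      match hm : matchLitLenB (c :: cs) with
      | some n => (tokB ((c :: cs).drop n)).map (fun ts => (c :: cs).take n :: ts)
      | none =>
        if hi : matchIdentLenB (c :: cs) ≠ 0 then
          (tokB ((c :: cs).drop (matchIdentLenB (c :: cs)))).map
            (fun ts => (c :: cs).take (matchIdentLenB (c :: cs)) :: ts)
        else none
termination_by l => l.length
decreasing_by
  all_goals simp only [List.length_drop, List.length_cons]
  · omega
  · have := matchLitLenB_pos _ _ hm; omega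
  · omega
def tokenize_rhs_alt (text : String) : List String :=
  ((tokB text.toList).getD []).map (fun t => String.ofList t)

-- ===== PRECONDITION & SPEC =====
-- Pre_ excludes exactly the inputs on which Python A raises YaccGrammarError (unterminated
-- string literal or unexpected character); it is the DFA of the regular token language
-- (whitespace | "literal" | identifier[*?])*.  States: 0 top, 1 inside identifier,
-- 2 inside string literal, 3 after backslash inside literal.
def preScan : List Char → Nat → Bool
  | [], st => st == 0 || st == 1
  | c :: cs, 0 =>
    if PySem.Chars.isspace c then preScan cs 0
    else if c = '"' then preScan cs 2
    else if isWordA c then preScan cs 1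
    else false
  | c :: cs, 1 =>
    if isWordA c then preScan cs 1
    else if c = '*' || c = '?' then preScan cs 0
    else if PySem.Chars.isspace c then preScan cs 0
    else if c = '"' then preScan cs 2
    else false
  | c :: cs, 2 =>
    if c = '"' then preScan cs 0
    else if c = '\\' then preScan cs 3
    else preScan cs 2
  | _ :: cs, _ => preScan cs 2

def Pre_tokenize_rhs (text : String) : Prop := preScan text.toList 0 = true
instance (text : String) : Decidable (Pre_tokenize_rhs text) := by unfold Pre_tokenize_rhs; infer_instance
def pvWitness_tokenize_rhs : String := "expr \"+\" term* opt?"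

def Spec_tokenize_rhs (text : String) (out : List String) : Prop := out = tokenize_rhs_alt text
instance (text : String) (out : List String) : Decidable (Spec_tokenize_rhs text out) := by unfold Spec_tokenize_rhs; infer_instance

-- ===== CLAIM (what is proved, stated in full; the proofs are below) =====
def Claim_equal_tokenize_rhs : Prop := ∀ (text : String), Dom_tokenize_rhs text → Pre_tokenize_rhs text → Spec_tokenize_rhs text (tokenize_rhs text)

-- ===== LEMMAS AND PROOFS =====

-- character classes agree on the domain (regex ASCII classes vs str.isspace / str.isalnum)
theorem spaceB_eq (c : Char) (h : pvDomChar c = true) : spaceB c = PySem.Chars.isspace c := by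
  simp only [pvDomChar, Bool.or_eq_true, Bool.and_eq_true, decide_eq_true_eq, beq_iff_eq] at h
  rw [Bool.eq_iff_iff]
  simp only [spaceB, PySem.Chars.isspace, Bool.or_eq_true, Bool.and_eq_true, decide_eq_true_eq,
    beq_iff_eq]
  omega

theorem identB_eq (c : Char) (h : pvDomChar c = true) : identB c = isWordA c := by
  have h95 : (c = '_') ↔ (c.toNat = 95) := by rw [Char.ext_iff, UInt32.ext_iff]; exact Iff.rfl
  have hle : ∀ a b : Char, (a ≤ b) ↔ (a.toNat ≤ b.toNat) := fun _ _ => Iff.rfl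
  simp only [pvDomChar, Bool.or_eq_true, Bool.and_eq_true, decide_eq_true_eq, beq_iff_eq] at h
  rw [Bool.eq_iff_iff]
  simp only [identB, isWordA, PySem.Chars.isalnum, PySem.Chars.isalpha, PySem.Chars.isdigit,
    PySem.Chars.isupper, PySem.Chars.islower, Bool.or_eq_true, Bool.and_eq_true,
    decide_eq_true_eq, beq_iff_eq, h95, hle]
  have e1 : 'A'.toNat = 65 := rfl
  have e2 : 'Z'.toNat = 90 := rfl
  have e3 : 'a'.toNat = 97 := rfl
  have e4 : 'z'.toNat = 122 := rfl
  have e5 : '0'.toNat = 48 := rfl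
  have e6 : '9'.toNat = 57 := rfl
  simp only [e1, e2, e3, e4, e5, e6]

theorem litBodyB_pos (cs : List Char) (n : Nat) (h : litBodyB cs = some n) : 1 ≤ n := by
  match cs with
  | [] => simp [litBodyB] at h
  | c :: cs0 =>
    rw [litBodyB.eq_def] at h
    by_cases h1 : c = '"'
    · simp [h1] at h; omega
    · by_cases h2 : c = '\\'
      · subst h2
        match cs0 with
        | [] => simp [h1] at h
        | d :: cs1 =>
          simp [h1] at h
          obtain ⟨a, -, rfl⟩ := h
          omega
      · simp [h1, h2] at h
        obtain ⟨a, -, rfl⟩ := h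
        omega

theorem litBodyB_ne_nil (cs : List Char) (n : Nat) (h : litBodyB cs = some n) : cs ≠ [] := by
  intro hc; subst hc; simp [litBodyB] at h

-- A's literal scan computes exactly the slice the regex alternative `"(?:\\.|[^"\\])*"` matches
theorem lit_eq_aux : ∀ (m : Nat) (cs : List Char), cs.length ≤ m → ∀ acc : List Char,
    scanLitA cs acc =
      (litBodyB cs).map (fun n => (acc.reverse ++ (cs.take n).dropLast, cs.drop n)) := by
  intro m
  induction m with
  | zero =>
    intro cs hm acc
    match cs with
    | [] => simp [scanLitA, litBodyB]
    | c :: _ => simp at hm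
  | succ m ih =>
    intro cs hm acc
    match cs with
    | [] => simp [scanLitA, litBodyB]
    | c :: cs0 =>
      rw [scanLitA.eq_def, litBodyB.eq_def]
      by_cases h1 : c = '"'
      · subst h1; simp
      · by_cases h2 : c = '\\'
        · subst h2
          match cs0 with
          | [] => simp [h1]
          | d :: cs1 =>
            simp only [h1, if_neg h1]
            rw [ih cs1 (by simp at hm ⊢; omega)]
            cases hl : litBodyB cs1 with
            | none => simp [hl]
            | some k =>
              have hk := litBodyB_pos cs1 k hl
              have hne := litBodyB_ne_nil cs1 k hl
              have htk : cs1.take k ≠ [] := by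
                intro hz
                rw [List.take_eq_nil_iff] at hz
                rcases hz with hz | hz
                · omega
                · exact hne hz
              simp only [hl, Option.map_some, List.take_succ_cons, List.drop_succ_cons,
                List.dropLast_cons_of_ne_nil (by simp [htk] : (d :: cs1.take k) ≠ []),
                List.dropLast_cons_of_ne_nil htk, List.reverse_cons, List.append_assoc]
              simp [List.dropLast_cons_of_ne_nil htk]
        · simp only [if_neg h1, if_neg h2]
          rw [ih cs0 (by simp at hm; omega)]
          cases hl : litBodyB cs0 with
          | none => simp [hl]
          | some k =>
            have hk := litBodyB_pos cs0 k hl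
            have hne := litBodyB_ne_nil cs0 k hl
            have htk : cs0.take k ≠ [] := by
              intro hz
              rw [List.take_eq_nil_iff] at hz
              rcases hz with hz | hz
              · omega
              · exact hne hz
            simp only [hl, Option.map_some, List.take_succ_cons, List.drop_succ_cons,
              List.dropLast_cons_of_ne_nil htk, List.reverse_cons, List.append_assoc]
            simp

theorem lit_eq (cs acc : List Char) :
    scanLitA cs acc =
      (litBodyB cs).map (fun n => (acc.reverse ++ (cs.take n).dropLast, cs.drop n)) :=
  lit_eq_aux cs.length cs le_rfl acc

-- the regex literal match ends with the closing quote
theorem lit_close_aux : ∀ (m : Nat) (cs : List Char), cs.length ≤ m → ∀ n : Nat,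
    litBodyB cs = some n → (cs.take n).dropLast ++ ['"'] = cs.take n := by
  intro m
  induction m with
  | zero =>
    intro cs hm n h
    match cs with
    | [] => simp [litBodyB] at h
    | c :: _ => simp at hm
  | succ m ih =>
    intro cs hm n h
    match cs with
    | [] => simp [litBodyB] at h
    | c :: cs0 =>
      rw [litBodyB.eq_def] at h
      by_cases h1 : c = '"'
      · subst h1
        simp at h
        obtain ⟨-, rfl⟩ := h
        simp
      · by_cases h2 : c = '\\'
        · subst h2
          match cs0 with
          | [] => simp [h1] at h
          | d :: cs1 =>
            simp [h1] at h
            obtain ⟨a, ha, rfl⟩ := h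
            have hrec := ih cs1 (by simp at hm ⊢; omega) a ha
            have hk := litBodyB_pos cs1 a ha
            have hne := litBodyB_ne_nil cs1 a ha
            have htk : cs1.take a ≠ [] := by
              intro hz
              rw [List.take_eq_nil_iff] at hz
              rcases hz with hz | hz
              · omega
              · exact hne hz
            simp only [List.take_succ_cons,
              List.dropLast_cons_of_ne_nil (by simp [htk] : (d :: cs1.take a) ≠ []),
              List.dropLast_cons_of_ne_nil htk, List.cons_append]
            rw [hrec]
        · simp [h1, h2] at h
          obtain ⟨a, ha, rfl⟩ := h
          have hrec := ih cs0 (by simp at hm; omega) a ha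
          have hk := litBodyB_pos cs0 a ha
          have hne := litBodyB_ne_nil cs0 a ha
          have htk : cs0.take a ≠ [] := by
            intro hz
            rw [List.take_eq_nil_iff] at hz
            rcases hz with hz | hz
            · omega
            · exact hne hz
          simp only [List.take_succ_cons, List.dropLast_cons_of_ne_nil htk, List.cons_append]
          rw [hrec]

theorem lit_close (cs : List Char) (n : Nat) (h : litBodyB cs = some n) :
    (cs.take n).dropLast ++ ['"'] = cs.take n :=
  lit_close_aux cs.length cs le_rfl n h

-- A's identifier scan computes exactly the slice the regex `[A-Za-z0-9_]+` matches
theorem word_eq : ∀ cs : List Char, cs.all pvDomChar = true →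
    scanWordA cs = (cs.take (wordLenB cs), cs.drop (wordLenB cs)) := by
  intro cs
  induction cs with
  | nil => simp [scanWordA, wordLenB]
  | cons c rest ih =>
    intro hd
    simp only [List.all_cons, Bool.and_eq_true] at hd
    rw [scanWordA, wordLenB, identB_eq c hd.1]
    by_cases hw : isWordA c = true
    · simp only [hw, if_true, ih hd.2, List.take_succ_cons, List.drop_succ_cons]
    · simp only [Bool.not_eq_true] at hw
      simp [hw]

-- B's loop is insensitive to taking the whitespace jump in smaller steps
theorem tokB_skip (cs : List Char) : tokB cs = tokB (cs.drop (matchSpaceLenB cs)) := by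
  match cs with
  | [] => simp [matchSpaceLenB]
  | c :: cs0 =>
    by_cases hsp : spaceB c = true
    · rw [tokB]
      have hm : matchSpaceLenB (c :: cs0) ≠ 0 := by rw [matchSpaceLenB, if_pos hsp]; omega
      simp only [hm, if_true, dif_pos hm]
    · rw [matchSpaceLenB, if_neg hsp, List.drop_zero]

theorem all_drop {p : Char → Bool} (l : List Char) (k : Nat) (h : l.all p = true) :
    (l.drop k).all p = true := by
  rw [List.all_eq_true] at h ⊢
  intro x hx
  exact h x (List.mem_of_mem_drop hx)

-- unfolding equations for the two loops
theorem tokA_space (c : Char) (cs0 : List Char) (hsp : PySem.Chars.isspace c = true) :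
    tokA (c :: cs0) = tokA cs0 := by
  rw [tokA]; simp [hsp]

theorem tokA_lit_some (cs0 content rest : List Char) (hl : scanLitA cs0 [] = some (content, rest)) :
    tokA ('"' :: cs0) = (tokA rest).map (fun ts => ('"' :: content ++ ['"']) :: ts) := by
  rw [tokA]
  rw [if_neg (show ¬(PySem.Chars.isspace '"' = true) from by decide), if_pos rfl]
  split
  · rename_i heq
    rw [hl] at heq
    cases heq
  · rename_i heq
    rw [hl] at heq
    injection heq with heq
    injection heq with h1 h2
    subst h1; subst h2
    rfl

theorem tokA_lit_none (cs0 : List Char) (hl : scanLitA cs0 [] = none) : tokA ('"' :: cs0) = none := by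
  rw [tokA]
  rw [if_neg (show ¬(PySem.Chars.isspace '"' = true) from by decide), if_pos rfl]
  split
  · rfl
  · rename_i heq
    rw [hl] at heq
    cases heq

theorem tokA_word_star (c : Char) (cs0 : List Char) (s : Char) (r' : List Char)
    (hsp : ¬ PySem.Chars.isspace c = true) (hq : ¬ c = '"') (hw : isWordA c = true)
    (hr : (scanWordA cs0).2 = s :: r') (hst : (s = '*' || s = '?') = true) :
    tokA (c :: cs0) = (tokA r').map (fun ts => (c :: (scanWordA cs0).1 ++ [s]) :: ts) := by
  rw [tokA]
  rw [if_neg hsp, if_neg hq, if_pos hw]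
  split
  · rename_i s2 r2 heq
    rw [hr] at heq
    injection heq with h1 h2
    subst h1; subst h2
    rw [if_pos hst]
  · rename_i heq
    rw [hr] at heq
    cases heq

theorem tokA_word_nostar (c : Char) (cs0 : List Char) (s : Char) (r' : List Char)
    (hsp : ¬ PySem.Chars.isspace c = true) (hq : ¬ c = '"') (hw : isWordA c = true)
    (hr : (scanWordA cs0).2 = s :: r') (hst : ¬ (s = '*' || s = '?') = true) :
    tokA (c :: cs0) = (tokA (s :: r')).map (fun ts => (c :: (scanWordA cs0).1) :: ts) := by
  rw [tokA]
  rw [if_neg hsp, if_neg hq, if_pos hw]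
  split
  · rename_i s2 r2 heq
    rw [hr] at heq
    injection heq with h1 h2
    subst h1; subst h2
    rw [if_neg hst]
  · rename_i heq
    rw [hr] at heq
    cases heq

theorem tokA_word_nil (c : Char) (cs0 : List Char)
    (hsp : ¬ PySem.Chars.isspace c = true) (hq : ¬ c = '"') (hw : isWordA c = true)
    (hr : (scanWordA cs0).2 = []) :
    tokA (c :: cs0) = (tokA ([] : List Char)).map (fun ts => (c :: (scanWordA cs0).1) :: ts) := by
  conv_lhs => rw [tokA]
  rw [if_neg hsp, if_neg hq, if_pos hw]
  split
  · rename_i heq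
    rw [hr] at heq
    cases heq
  · rfl

theorem tokA_fail (c : Char) (cs0 : List Char)
    (hsp : ¬ PySem.Chars.isspace c = true) (hq : ¬ c = '"') (hw : ¬ isWordA c = true) :
    tokA (c :: cs0) = none := by
  rw [tokA]
  simp [hsp, hq, hw]

theorem tokB_cons_lit (c : Char) (cs0 : List Char) (hm0 : matchSpaceLenB (c :: cs0) = 0)
    (n : Nat) (hlit : matchLitLenB (c :: cs0) = some n) :
    tokB (c :: cs0) = (tokB ((c :: cs0).drop n)).map (fun ts => (c :: cs0).take n :: ts) := by
  rw [tokB]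
  rw [dif_neg (by simp [hm0])]
  split
  · rename_i n2 heq
    rw [hlit] at heq
    injection heq with h
    subst h
    rfl
  · rename_i heq
    rw [hlit] at heq
    cases heq

theorem tokB_cons_ident (c : Char) (cs0 : List Char) (hm0 : matchSpaceLenB (c :: cs0) = 0)
    (hlit : matchLitLenB (c :: cs0) = none) (hid : matchIdentLenB (c :: cs0) ≠ 0) :
    tokB (c :: cs0) = (tokB ((c :: cs0).drop (matchIdentLenB (c :: cs0)))).map
      (fun ts => (c :: cs0).take (matchIdentLenB (c :: cs0)) :: ts) := by
  rw [tokB]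
  rw [dif_neg (by simp [hm0])]
  split
  · rename_i n2 heq
    rw [hlit] at heq
    cases heq
  · rw [dif_pos hid]

theorem tokB_cons_fail (c : Char) (cs0 : List Char) (hm0 : matchSpaceLenB (c :: cs0) = 0)
    (hlit : matchLitLenB (c :: cs0) = none) (hid : matchIdentLenB (c :: cs0) = 0) :
    tokB (c :: cs0) = none := by
  rw [tokB]
  rw [dif_neg (by simp [hm0])]
  split
  · rename_i n2 heq
    rw [hlit] at heq
    cases heq
  · rw [dif_neg (by simp [hid])]

-- A's scanner and B's regex scanner agree on every domain input
theorem tok_eq (n : Nat) : ∀ cs : List Char, cs.length ≤ n → cs.all pvDomChar = true →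
    tokA cs = tokB cs := by
  induction n with
  | zero =>
    intro cs hn _
    match cs with
    | [] => rw [tokA.eq_def, tokB.eq_def]
    | c :: _ => simp at hn
  | succ n ih =>
    intro cs hn hd
    match cs with
    | [] => rw [tokA.eq_def, tokB.eq_def]
    | c :: cs0 =>
      simp only [List.all_cons, Bool.and_eq_true] at hd
      obtain ⟨hdc, hdcs⟩ := hd
      have hn0 : cs0.length ≤ n := by simp at hn; omega
      by_cases hsp : PySem.Chars.isspace c = true
      · -- whitespace: A skips one character, B jumps the whole \s+ match
        have hspB : spaceB c = true := by rw [spaceB_eq c hdc]; exact hsp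
        have hmS : matchSpaceLenB (c :: cs0) = matchSpaceLenB cs0 + 1 := by
          rw [matchSpaceLenB, if_pos hspB]
        have e2 : tokB (c :: cs0) = tokB ((c :: cs0).drop (matchSpaceLenB (c :: cs0))) := by
          rw [tokB]
          rw [dif_pos (by rw [hmS]; omega)]
        rw [tokA_space c cs0 hsp, e2, hmS, List.drop_succ_cons, ← tokB_skip cs0]
        exact ih cs0 hn0 hdcs
      · have hspB : spaceB c = false := by rw [spaceB_eq c hdc]; simpa using hsp
        have hm0 : matchSpaceLenB (c :: cs0) = 0 := by rw [matchSpaceLenB, if_neg (by simp [hspB])]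
        by_cases hq : c = '"'
        · -- string literal
          subst hq
          cases hlit : litBodyB cs0 with
          | none =>
            have hA : scanLitA cs0 [] = none := by rw [lit_eq]; simp [hlit]
            have hlitB : matchLitLenB ('"' :: cs0) = none := by
              rw [matchLitLenB, if_pos rfl, hlit]
              rfl
            have hid : matchIdentLenB ('"' :: cs0) = 0 := by
              simp [matchIdentLenB, wordLenB, show identB '"' = false from rfl]
            rw [tokA_lit_none cs0 hA, tokB_cons_fail _ _ hm0 hlitB hid]
          | some k =>
            have hA : scanLitA cs0 [] = some ((cs0.take k).dropLast, cs0.drop k) := by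
              rw [lit_eq]; simp [hlit]
            have hlitB : matchLitLenB ('"' :: cs0) = some (k + 1) := by
              rw [matchLitLenB, if_pos rfl, hlit]
              rfl
            rw [tokA_lit_some cs0 _ _ hA, tokB_cons_lit _ _ hm0 _ hlitB]
            rw [List.drop_succ_cons, List.take_succ_cons]
            rw [ih (cs0.drop k) (by rw [List.length_drop]; omega) (all_drop cs0 k hdcs)]
            simp only [List.cons_append, lit_close cs0 k hlit]
        · by_cases hw : isWordA c = true
          · -- identifier
            have hiB : identB c = true := by rw [identB_eq c hdc]; exact hw
            have hword := word_eq cs0 hdcs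
            have hp1 : (scanWordA cs0).1 = cs0.take (wordLenB cs0) := by rw [hword]
            have hr2 : (scanWordA cs0).2 = cs0.drop (wordLenB cs0) := by rw [hword]
            have hlitB : matchLitLenB (c :: cs0) = none := by rw [matchLitLenB, if_neg hq]
            have hwl : wordLenB (c :: cs0) = wordLenB cs0 + 1 := by rw [wordLenB, if_pos hiB]
            cases hdk : cs0.drop (wordLenB cs0) with
            | nil =>
              have hid : matchIdentLenB (c :: cs0) = wordLenB cs0 + 1 := by
                simp [matchIdentLenB, hwl, List.drop_succ_cons, hdk]
              rw [tokA_word_nil c cs0 hsp hq hw (hr2.trans hdk),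
                tokB_cons_ident c cs0 hm0 hlitB (by rw [hid]; omega), hid,
                List.drop_succ_cons, List.take_succ_cons, hdk, hp1]
              rw [ih [] (by simp) (by simp)]
            | cons s r' =>
              have hr3 : (scanWordA cs0).2 = s :: r' := hr2.trans hdk
              have hgetk : cs0[wordLenB cs0]? = some s := by
                have := congrArg (fun l => l[0]?) hdk
                simpa [List.getElem?_drop] using this
              have htk1 : cs0.take (wordLenB cs0 + 1) = cs0.take (wordLenB cs0) ++ [s] := by
                rw [List.take_add_one, hgetk]
                rfl
              have hdom_sr : (s :: r').all pvDomChar = true := by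
                rw [← hdk]
                exact all_drop cs0 _ hdcs
              have hlen_sr : (s :: r').length ≤ n := by
                have := congrArg List.length hdk
                simp at this ⊢
                omega
              by_cases hst : (s = '*' || s = '?') = true
              · have hid : matchIdentLenB (c :: cs0) = wordLenB cs0 + 2 := by
                  simp [matchIdentLenB, hwl, List.drop_succ_cons, hdk, hst]
                rw [tokA_word_star c cs0 s r' hsp hq hw hr3 hst,
                  tokB_cons_ident c cs0 hm0 hlitB (by rw [hid]; omega), hid]
                have hd2 : (c :: cs0).drop (wordLenB cs0 + 2) = r' := by
                  rw [List.drop_succ_cons, ← List.tail_drop, hdk]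
                  rfl
                have ht2 : (c :: cs0).take (wordLenB cs0 + 2) = c :: (cs0.take (wordLenB cs0) ++ [s]) := by
                  rw [List.take_succ_cons, htk1]
                rw [hd2, ht2, hp1]
                rw [ih r' (by simp at hlen_sr ⊢; omega)
                  (by simp only [List.all_cons, Bool.and_eq_true] at hdom_sr; exact hdom_sr.2)]
                simp only [List.cons_append]
              · have hid : matchIdentLenB (c :: cs0) = wordLenB cs0 + 1 := by
                  simp [matchIdentLenB, hwl, List.drop_succ_cons, hdk, hst]
                rw [tokA_word_nostar c cs0 s r' hsp hq hw hr3 hst,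
                  tokB_cons_ident c cs0 hm0 hlitB (by rw [hid]; omega), hid,
                  List.drop_succ_cons, List.take_succ_cons, hdk, hp1]
                rw [ih (s :: r') hlen_sr hdom_sr]
          · -- no alternative matches: raise on both sides
            have hiB : identB c = false := by rw [identB_eq c hdc]; simpa using hw
            have hlitB : matchLitLenB (c :: cs0) = none := by rw [matchLitLenB, if_neg hq]
            have hid : matchIdentLenB (c :: cs0) = 0 := by
              simp [matchIdentLenB, wordLenB, hiB]
            rw [tokA_fail c cs0 hsp hq hw, tokB_cons_fail c cs0 hm0 hlitB hid]

-- ===== VERDICT (by name: the statement is the Claim_ definition above) =====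
theorem tokenize_rhs_spec : Claim_equal_tokenize_rhs := by
  intro text hdom _
  unfold Spec_tokenize_rhs tokenize_rhs tokenize_rhs_alt
  rw [tok_eq text.toList.length text.toList le_rfl hdom]
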